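-- pv_equiv track=rewrite | github.com/DavideValentini/personal_projects | random_projects/encryption_project/backup 3_11.py | str_to_ascii
-- ===== SOURCE A (Python) =====
-- def str_to_ascii(m):
--     m=str(m)
--     tmp_ascii=[ord(char) for char in m]
--     m_ascii=''
--     for k in tmp_ascii:
--         m_ascii=m_ascii+str(k)
--     m_len=len(m_ascii)
--     m=int(m_ascii)
--     return m
-- ===== SOURCE B (Python) =====
-- def str_to_ascii(m):
--     m = str(m)
--     n = 0
--     for char in m:
--         code = ord(char)
--         n = n * 10 ** len(str(code)) + code
--     return n
-- ===== Notes on version B (the rewrite author's own statement) =====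
-- stated objective: alternative
-- what changed: B never builds the concatenated digit string: it folds over the characters keeping an integer accumulator, shifting it left by the decimal width of each code (n = n*10**len(str(code)) + code) instead of string-concatenating all codes and parsing the result with int().
-- outside the precondition, e.g. on str_to_ascii(''): A raises ValueError, B returns 0
import Mathlib
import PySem

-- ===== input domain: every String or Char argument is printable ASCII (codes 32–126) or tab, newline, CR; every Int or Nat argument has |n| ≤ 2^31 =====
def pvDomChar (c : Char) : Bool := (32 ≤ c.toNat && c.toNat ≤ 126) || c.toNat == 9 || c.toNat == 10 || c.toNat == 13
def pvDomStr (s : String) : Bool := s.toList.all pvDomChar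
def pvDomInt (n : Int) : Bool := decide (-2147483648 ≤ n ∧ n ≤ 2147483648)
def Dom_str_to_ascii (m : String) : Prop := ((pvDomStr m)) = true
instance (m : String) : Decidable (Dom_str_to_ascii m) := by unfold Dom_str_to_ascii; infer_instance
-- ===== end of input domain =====

-- B replaces A's build-a-digit-string-then-int() with a pure arithmetic fold over the
-- characters (same value, no intermediate string); no speed is claimed.

-- ===== PORT A =====
-- int(s) restricted by hand: a plain decimal read, exact on the nonempty all-digit
-- strings that m_ascii always is inside Pre_ (each ord is a nonnegative number, so
-- str(k) is digit-only); Pre_ excludes the empty string, where Python's int('') raises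
-- ValueError and this returns junk 0.
def pyIntDigits (ds : List Char) : Int :=
  ds.foldl (fun a c => a * 10 + ((c.toNat : Int) - 48)) 0

def str_to_ascii (m : String) : Int :=
  let tmp_ascii : List Int := m.toList.map (fun char => (char.toNat : Int))
  let m_ascii : List Char :=
    tmp_ascii.foldl (fun acc k => acc ++ PySem.Int.toChars k) []
  -- A also computes m_len = len(m_ascii), which is unused; dropped here.
  pyIntDigits m_ascii

-- ===== PORT B =====
def str_to_ascii_alt (m : String) : Int :=
  m.toList.foldl
    (fun n char =>
      let code : Int := (char.toNat : Int)
      n * 10 ^ (PySem.Int.toChars code).length + code) 0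

-- ===== PRECONDITION & SPEC =====
-- Pre_ excludes exactly where Python A raises ValueError: the empty string, on which
-- int('') fails (B returns 0 there).
def Pre_str_to_ascii (m : String) : Prop := m ≠ ""
instance (m : String) : Decidable (Pre_str_to_ascii m) := by unfold Pre_str_to_ascii; infer_instance

def pvWitness_str_to_ascii : String := "a"

def Spec_str_to_ascii (m : String) (out : Int) : Prop := out = str_to_ascii_alt m
instance (m : String) (out : Int) : Decidable (Spec_str_to_ascii m out) := by unfold Spec_str_to_ascii; infer_instance

-- ===== CLAIM (what is proved, stated in full; the proofs are below) =====
def Claim_equal_str_to_ascii : Prop := ∀ (m : String), Dom_str_to_ascii m → Pre_str_to_ascii m → Spec_str_to_ascii m (str_to_ascii m)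

-- ===== LEMMAS AND PROOFS =====

-- the accumulator of the decimal read shifts out: foldl from a = a·10^len + foldl from 0
lemma pyIntDigits_foldl_shift (t : List Char) :
    ∀ a : Int, t.foldl (fun a c => a * 10 + ((c.toNat : Int) - 48)) a
      = a * 10 ^ t.length + pyIntDigits t := by
  induction t with
  | nil => intro a; simp [pyIntDigits]
  | cons c t ih =>
      intro a
      simp only [List.foldl_cons, List.length_cons, pyIntDigits] at *
      rw [ih (a * 10 + ((c.toNat : Int) - 48)), ih (0 * 10 + ((c.toNat : Int) - 48))]
      ring

lemma pyIntDigits_append (s t : List Char) :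
    pyIntDigits (s ++ t) = pyIntDigits s * 10 ^ t.length + pyIntDigits t := by
  simp only [pyIntDigits, List.foldl_append]
  exact pyIntDigits_foldl_shift t _

-- reading back str(k) gives k, for every code a Dom character can have
lemma pyIntDigits_toChars : ∀ k : Nat, k < 127 →
    pyIntDigits (PySem.Int.toChars (k : Int)) = (k : Int) := by decide

lemma domChar_lt (c : Char) (h : pvDomChar c = true) : c.toNat < 127 := by
  simp [pvDomChar] at h
  omega

-- invariant: reading the string built so far, then folding the rest arithmetically
lemma str_to_ascii_invariant (cs : List Char) :
    ∀ acc : List Char, (∀ c ∈ cs, pvDomChar c = true) →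
      pyIntDigits (cs.foldl (fun s c => s ++ PySem.Int.toChars ((c.toNat : Int))) acc)
        = cs.foldl
            (fun n char =>
              let code : Int := (char.toNat : Int)
              n * 10 ^ (PySem.Int.toChars code).length + code)
            (pyIntDigits acc) := by
  induction cs with
  | nil => intro acc _; rfl
  | cons c cs ih =>
      intro acc hdom
      simp only [List.foldl_cons]
      rw [ih (acc ++ PySem.Int.toChars ((c.toNat : Int)))
            (fun x hx => hdom x (List.mem_cons_of_mem _ hx))]
      rw [pyIntDigits_append,
          pyIntDigits_toChars c.toNat (domChar_lt c (hdom c (List.mem_cons_self)))]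

-- ===== VERDICT (by name: the statement is the Claim_ definition above) =====
theorem str_to_ascii_spec : Claim_equal_str_to_ascii := by
  intro m hdom _
  unfold Spec_str_to_ascii str_to_ascii str_to_ascii_alt
  have hall : ∀ c ∈ m.toList, pvDomChar c = true := by
    have := hdom
    unfold Dom_str_to_ascii pvDomStr at this
    simpa [List.all_eq_true] using this
  simp only [List.foldl_map]
  have := str_to_ascii_invariant m.toList [] hall
  simpa [pyIntDigits] using this
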